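-- pv_equiv track=rewrite | github.com/kircherlab/hemoMIPs | scripts/pipeline2.0/ReAssignIndexBAM.py | get_min_qual
-- ===== SOURCE A (Python) =====
-- INF_QUALITY = 200
--
-- def get_min_qual(qualstring,qualN):
--   cmin = INF_QUALITY
--   allowZero = 1
--   for pos,i in enumerate(map(lambda x:ord(x)-33,qualstring)):
--     if (len(qualN) > pos) and qualN[pos] == "N": continue
--     if allowZero > 0 and i == 0: allowZero -= 1
--     elif i < cmin: cmin = i
--   return cmin
-- ===== SOURCE B (Python) =====
-- INF_QUALITY = 200
--
-- def get_min_qual(qualstring, qualN):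
--     # Staged strategy instead of A's stateful one-pass scan: collect the
--     # quality values at unmasked positions, sort them, remove one zero (the
--     # "allow one zero" rule), and read the answer off the smallest remaining
--     # value, capped at INF_QUALITY.
--     vals = sorted(ord(c) - 33
--                   for pos, c in enumerate(qualstring)
--                   if not (pos < len(qualN) and qualN[pos] == "N"))
--     try:
--         vals.remove(0)
--     except ValueError:
--         pass
--     return min(INF_QUALITY, vals[0]) if vals else INF_QUALITY
-- ===== Notes on version B (the rewrite author's own statement) =====
-- stated objective: alternative
-- what changed: Replaces A's stateful one-pass 'allow one zero' running minimum with a staged sort-based algorithm: collect unmasked quality values, sort them, remove a single zero, then take the smallest remaining value capped at 200.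
import Mathlib
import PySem

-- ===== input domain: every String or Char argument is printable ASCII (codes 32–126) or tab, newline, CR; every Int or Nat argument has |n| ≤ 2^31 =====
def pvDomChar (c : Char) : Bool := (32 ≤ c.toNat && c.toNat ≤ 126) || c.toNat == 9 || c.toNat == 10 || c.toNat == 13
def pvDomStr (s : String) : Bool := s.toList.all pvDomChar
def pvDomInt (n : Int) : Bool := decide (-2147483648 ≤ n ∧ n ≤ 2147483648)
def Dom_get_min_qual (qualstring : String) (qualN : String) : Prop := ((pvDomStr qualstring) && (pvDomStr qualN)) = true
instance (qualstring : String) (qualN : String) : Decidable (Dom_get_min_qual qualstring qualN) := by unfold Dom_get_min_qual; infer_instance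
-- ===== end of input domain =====

-- B replaces A's stateful one-pass "allow one zero" running minimum with a
-- staged algorithm: sort the unmasked quality values, remove one zero, and
-- take the smallest remaining value capped at 200; alternative decomposition.


-- ===== PORT A =====
-- loop body of A: state (cmin, allowZero)
def pvStepA (qn : List Char) (st : Int × Int) (pi : Int × Char) : Int × Int :=
  let i : Int := (pi.2.toNat : Int) - 33
  if (qn.length : Int) > pi.1 ∧ PySem.List.pyGet? qn pi.1 = some 'N' then st
  else if st.2 > 0 ∧ i = 0 then (st.1, st.2 - 1)
  else if i < st.1 then (i, st.2)
  else st

def get_min_qual (qualstring : String) (qualN : String) : Int :=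
  ((PySem.List.enumerate qualstring.toList).foldl (pvStepA qualN.toList) (200, 1)).1

-- ===== PORT B =====
-- the generator's filter: keep positions that are not masked by an 'N'
def pvKeep (qn : List Char) (p : Int × Char) : Bool :=
  !(decide ((qn.length : Int) > p.1 ∧ PySem.List.pyGet? qn p.1 = some 'N'))

-- ord(c) - 33 for an enumerated character
def pvVal (p : Int × Char) : Int := (p.2.toNat : Int) - 33

def get_min_qual_alt (qualstring : String) (qualN : String) : Int :=
  let vals := PySem.List.sorted
    (((PySem.List.enumerate qualstring.toList).filter (pvKeep qualN.toList)).map pvVal)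
    (fun x => x) false
  -- try: vals.remove(0)  except ValueError: pass
  let vals' := match PySem.List.remove? vals 0 with
    | some l => l
    | none => vals
  match vals' with
  | [] => 200
  | h :: _ => min 200 h

-- ===== PRECONDITION & SPEC =====
def Spec_get_min_qual (qualstring : String) (qualN : String) (out : Int) : Prop := out = get_min_qual_alt qualstring qualN
instance (qualstring : String) (qualN : String) (out : Int) : Decidable (Spec_get_min_qual qualstring qualN out) := by unfold Spec_get_min_qual; infer_instance

-- ===== CLAIM (what is proved, stated in full; the proofs are below) =====
def Claim_equal_get_min_qual : Prop := ∀ (qualstring : String) (qualN : String), Dom_get_min_qual qualstring qualN → Spec_get_min_qual qualstring qualN (get_min_qual qualstring qualN)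

-- ===== LEMMAS AND PROOFS =====

-- A's loop body restricted to the kept quality values
def pvStepAv (st : Int × Int) (v : Int) : Int × Int :=
  if st.2 > 0 ∧ v = 0 then (st.1, st.2 - 1)
  else if v < st.1 then (v, st.2)
  else st

-- ghost aggregate state: (minimum of the non-zero values seen, number of zeros seen)
def pvAgg (st : Int × Int) (v : Int) : Int × Int :=
  if v = 0 then (st.1, st.2 + 1)
  else if v < st.1 then (v, st.2)
  else st

def pvNzmin (l : List Int) : Int := (l.filter (fun v => !(v == 0))).foldl min 200

def pvF (l : List Int) : Int := if 2 ≤ l.count 0 then min (pvNzmin l) 0 else pvNzmin l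

-- abstraction from the aggregate state to A's state
def pvPhi (b : Int × Int) : Int × Int :=
  if b.2 ≥ 2 then (min b.1 0, 0) else (b.1, 1 - b.2)

-- 1. A's fold over the enumerated string is pvStepAv folded over the kept values
theorem pvA_filter (qn : List Char) (L : List (Int × Char)) (st : Int × Int) :
    L.foldl (pvStepA qn) st = ((L.filter (pvKeep qn)).map pvVal).foldl pvStepAv st := by
  induction L generalizing st with
  | nil => rfl
  | cons p L ih =>
    by_cases h : (qn.length : Int) > p.1 ∧ PySem.List.pyGet? qn p.1 = some 'N'
    · simp [List.foldl_cons, pvStepA, pvKeep, h, ih]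
    · simp [List.foldl_cons, pvStepA, pvKeep, h, ih, pvStepAv, pvVal]

-- 2. pvPhi commutes the two loop bodies
theorem pvStep_comm (b : Int × Int) (hz : 0 ≤ b.2) (v : Int) :
    pvStepAv (pvPhi b) v = pvPhi (pvAgg b v) ∧ 0 ≤ (pvAgg b v).2 := by
  obtain ⟨m, z⟩ := b
  simp only [pvStepAv, pvAgg, pvPhi]
  by_cases hv : v = 0
  · simp only [hv, if_true]
    split_ifs <;> simp_all <;> omega
  · simp only [if_neg hv]
    split_ifs <;> simp_all <;> omega

theorem pvFold_comm (l : List Int) (b : Int × Int) (hz : 0 ≤ b.2) :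
    l.foldl pvStepAv (pvPhi b) = pvPhi (l.foldl pvAgg b) ∧ 0 ≤ (l.foldl pvAgg b).2 := by
  induction l generalizing b with
  | nil => exact ⟨rfl, hz⟩
  | cons v l ih =>
    obtain ⟨h1, h2⟩ := pvStep_comm b hz v
    simpa [List.foldl_cons, h1] using ih (pvAgg b v) h2

-- 3. the aggregate fold computes (non-zero minimum, zero count)
theorem pvAgg_char (l : List Int) (m z : Int) :
    l.foldl pvAgg (m, z) = ((l.filter (fun v => !(v == 0))).foldl min m, z + (l.count 0 : Int)) := by
  induction l generalizing m z with
  | nil => simp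
  | cons v l ih =>
    by_cases hv : v = 0
    · simp only [hv, List.foldl_cons, pvAgg, if_true, List.filter_cons, List.count_cons]
      rw [ih]
      simp
      omega
    · have hcnt : (v :: l).count 0 = l.count 0 := by simp [hv]
      have hfil : (v :: l).filter (fun v => !(v == 0)) = v :: l.filter (fun v => !(v == 0)) := by
        simp [hv]
      by_cases h : v < m
      · simp only [List.foldl_cons, pvAgg, if_neg hv, if_pos h, ih, hcnt, hfil]
        rw [min_eq_right h.le]
      · simp only [List.foldl_cons, pvAgg, if_neg hv, if_neg h, ih, hcnt, hfil]
        rw [min_eq_left (by omega)]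

-- A's result as pvF
theorem pvA_eq_F (qs qn : String) :
    get_min_qual qs qn =
      pvF (((PySem.List.enumerate qs.toList).filter (pvKeep qn.toList)).map pvVal) := by
  unfold get_min_qual
  rw [pvA_filter]
  set l := ((PySem.List.enumerate qs.toList).filter (pvKeep qn.toList)).map pvVal with hl
  have h0 : pvPhi (200, 0) = ((200 : Int), (1 : Int)) := by decide
  obtain ⟨h1, _⟩ := pvFold_comm l (200, 0) (by norm_num)
  rw [← h0, h1, pvAgg_char]
  unfold pvPhi pvF pvNzmin
  by_cases h : 2 ≤ l.count 0
  · rw [if_pos (by push_cast; omega), if_pos h]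
  · rw [if_neg (by push_cast; omega), if_neg h]

-- folding min is invariant under permutation
theorem pvFoldlMin_perm {l₁ l₂ : List Int} (p : l₁.Perm l₂) :
    ∀ a : Int, l₁.foldl min a = l₂.foldl min a := by
  induction p with
  | nil => intro a; rfl
  | cons x _ ih => intro a; simp only [List.foldl_cons]; exact ih _
  | swap x y l => intro a; simp only [List.foldl_cons]; rw [min_right_comm]
  | trans _ _ ih1 ih2 => intro a; rw [ih1 a, ih2 a]

-- pvF is invariant under permutation
theorem pvF_perm {l₁ l₂ : List Int} (p : l₁.Perm l₂) : pvF l₁ = pvF l₂ := by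
  unfold pvF pvNzmin
  rw [p.count_eq, pvFoldlMin_perm (p.filter _) 200]

-- pulling a min out of the accumulator
theorem pvFoldlMin_out (l : List Int) : ∀ a c : Int, l.foldl min (min a c) = min (l.foldl min a) c := by
  induction l with
  | nil => intro a c; rfl
  | cons x l ih =>
    intro a c
    simp only [List.foldl_cons]
    rw [min_right_comm a c x, ih]

theorem pvFoldlMin_const (l : List Int) : ∀ a : Int, (∀ y ∈ l, a ≤ y) → l.foldl min a = a := by
  induction l with
  | nil => intro a _; rfl
  | cons x l ih =>
    intro a h
    simp only [List.foldl_cons]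
    rw [min_eq_left (h x (by simp)), ih a fun y hy => h y (by simp [hy])]

-- L2: splitting the zeros out of a min fold
theorem pvMin_split (l : List Int) : ∀ a : Int,
    l.foldl min a =
      if 0 ∈ l then min ((l.filter (fun v => !(v == 0))).foldl min a) 0
      else (l.filter (fun v => !(v == 0))).foldl min a := by
  induction l with
  | nil => intro a; simp
  | cons v l ih =>
    intro a
    by_cases hv : v = 0
    · subst hv
      have hf : ((0:Int) :: l).filter (fun v => !(v == 0)) = l.filter (fun v => !(v == 0)) := by
        simp
      rw [List.foldl_cons, ih (min a 0), if_pos (List.mem_cons_self), hf]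
      by_cases h0 : 0 ∈ l
      · rw [if_pos h0, pvFoldlMin_out, min_assoc, min_self]
      · rw [if_neg h0, pvFoldlMin_out]
    · have hne : ¬ ((0:Int) = v) := fun h => hv h.symm
      have hf : (v :: l).filter (fun v => !(v == 0)) = v :: l.filter (fun v => !(v == 0)) := by
        simp [hv]
      have hmem : ((0:Int) ∈ v :: l) ↔ (0:Int) ∈ l := by simp [hne]
      rw [List.foldl_cons, ih (min a v), hf]
      by_cases h0 : 0 ∈ l
      · rw [if_pos (hmem.mpr h0), if_pos h0, List.foldl_cons]
      · rw [if_neg (fun hc => h0 (hmem.mp hc)), if_neg h0, List.foldl_cons]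

-- erasing one zero does not change the non-zero values
theorem pvErase_filter (l : List Int) :
    (l.erase 0).filter (fun v => !(v == 0)) = l.filter (fun v => !(v == 0)) := by
  induction l with
  | nil => rfl
  | cons x l ih =>
    by_cases hx : x = 0
    · subst hx; simp
    · simp [hx, ih]

-- the head computation and the try/except remove of B, as named functions
def pvHead200 (s : List Int) : Int := match s with | [] => 200 | h :: _ => min 200 h
def pvRem (s : List Int) : List Int := match PySem.List.remove? s 0 with | some l => l | none => s

-- taking the head of a sorted list is taking its minimum
theorem pvHead_sorted (s : List Int) (hs : s.Pairwise (· ≤ ·)) :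
    pvHead200 s = s.foldl min 200 := by
  unfold pvHead200
  cases s with
  | nil => rfl
  | cons h t =>
    simp only [List.foldl_cons]
    rw [pvFoldlMin_const t (min 200 h) fun y hy =>
      le_trans (min_le_right 200 h) ((List.pairwise_cons.mp hs).1 y hy)]

-- B's sorted-remove-head computation equals pvF, on a sorted list
theorem pvB_core (s : List Int) (hs : s.Pairwise (· ≤ ·)) :
    pvHead200 (pvRem s) = pvF s := by
  unfold pvRem
  by_cases h0 : (0 : Int) ∈ s
  · rw [PySem.List.remove?_eq_some_erase s 0 h0]
    have hse : (s.erase 0).Pairwise (· ≤ ·) := hs.sublist List.erase_sublist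
    rw [pvHead_sorted _ hse, pvMin_split]
    have hcnt : (s.erase 0).count 0 = s.count 0 - 1 := List.count_erase_self
    have hc1 : 1 ≤ s.count 0 := List.one_le_count_iff.mpr h0
    unfold pvF pvNzmin
    rw [pvErase_filter]
    by_cases h2 : 2 ≤ s.count 0
    · rw [if_pos h2, if_pos (by
        rw [← List.one_le_count_iff, hcnt]; omega)]
    · rw [if_neg h2, if_neg (by
        rw [← List.one_le_count_iff, hcnt]; omega)]
  · rw [(PySem.List.remove?_eq_none_iff s 0).mpr h0]
    rw [pvHead_sorted s hs, pvMin_split, if_neg h0]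
    unfold pvF pvNzmin
    rw [if_neg (by rw [← List.one_le_count_iff] at h0; omega)]

-- ===== VERDICT (by name: the statement is the Claim_ definition above) =====
theorem get_min_qual_spec : Claim_equal_get_min_qual := by
  intro qs qn _
  unfold Spec_get_min_qual
  rw [pvA_eq_F]
  unfold get_min_qual_alt
  set vals := ((PySem.List.enumerate qs.toList).filter (pvKeep qn.toList)).map pvVal with hv
  have hperm : (PySem.List.sorted vals (fun x => x) false).Perm vals :=
    PySem.List.sorted_perm vals (fun x => x) false
  have hsorted : (PySem.List.sorted vals (fun x => x) false).Pairwise (· ≤ ·) := by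
    have := PySem.List.sorted_pairwise (xs := vals) (key := fun x => x)
    simpa using this
  rw [pvF_perm hperm.symm]
  exact (pvB_core _ hsorted).symm
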